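-- pv_equiv track=rewrite | github.com/Metroid200/CPSC-323-Assignment-1 | main.py | id_FSM
-- ===== SOURCE A (Python) =====
-- def id_FSM(id):
--     states = {
--         'start': [('abcdefghijklmnopqrstuvwxyzABCDEFGHIJKLMNOPQRSTUVWXYZ', 'letter')],
--         'letter': [('abcdefghijklmnopqrstuvwxyzABCDEFGHIJKLMNOPQRSTUVWXYZ', 'letter'), ('0123456789', 'integer'), ('_', 'underscore')],
--         'integer': [('abcdefghijklmnopqrstuvwxyzABCDEFGHIJKLMNOPQRSTUVWXYZ', 'letter'), ('0123456789', 'integer'), ('_', 'underscore')],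
--         'underscore': [('abcdefghijklmnopqrstuvwxyzABCDEFGHIJKLMNOPQRSTUVWXYZ', 'letter'), ('0123456789', 'integer'), ('_', 'underscore')],
--     }
--     state = 'start'
--     while True:
--         if (len(id) > 0):
--             token = id[0]
--             id = id[1:]
--             found = False
--             for v in states[state]:
--                 if token in v[0]:
--                     state = v[1]
--                     found = True
--                     break
--             if not found:
--                 state = 'error'
--                 break
--         else:
--             if state != 'letter' and state != 'integer' and state != 'underscore':
--                 state = 'error'
--             break
--     return state
-- ===== SOURCE B (Python) =====
-- LETTERS = 'abcdefghijklmnopqrstuvwxyzABCDEFGHIJKLMNOPQRSTUVWXYZ'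
-- DIGITS = '0123456789'
--
-- def _classify(c):
--     if c in LETTERS:
--         return 'letter'
--     if c in DIGITS:
--         return 'integer'
--     return 'underscore'
--
-- def id_FSM(id):
--     if not id or id[0] not in LETTERS:
--         return 'error'
--     if any(c not in LETTERS and c not in DIGITS and c != '_' for c in id):
--         return 'error'
--     return _classify(id[-1])
-- ===== Notes on version B (the rewrite author's own statement) =====
-- stated objective: faster
-- what changed: Replaced the running-state transition-table simulation (which re-slices the string with id[1:] every iteration) with a direct validity check (first char a letter, all chars letter/digit/underscore) plus a single classification of the last character.
import Mathlib
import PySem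

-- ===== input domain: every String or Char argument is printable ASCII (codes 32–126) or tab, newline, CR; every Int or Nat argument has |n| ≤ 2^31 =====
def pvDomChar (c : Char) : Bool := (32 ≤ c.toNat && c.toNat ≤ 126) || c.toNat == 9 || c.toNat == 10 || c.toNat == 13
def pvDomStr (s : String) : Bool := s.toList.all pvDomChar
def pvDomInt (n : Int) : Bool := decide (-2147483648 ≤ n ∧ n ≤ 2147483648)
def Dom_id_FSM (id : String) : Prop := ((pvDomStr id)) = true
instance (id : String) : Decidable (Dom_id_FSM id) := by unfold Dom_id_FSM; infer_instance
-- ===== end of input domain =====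

-- B replaces A's transition-table FSM simulation (which re-slices the string each
-- iteration) with a direct validity check plus last-character classification
-- (objective: faster, measured).

def pvLetters : List Char := "abcdefghijklmnopqrstuvwxyzABCDEFGHIJKLMNOPQRSTUVWXYZ".toList
def pvDigits : List Char := "0123456789".toList

-- ===== PORT A =====
-- the transition list states[state] (dict lookup; only these four states ever reach it)
def pvStatesA (s : String) : List (List Char × String) :=
  if s = "start" then [(pvLetters, "letter")]
  else [(pvLetters, "letter"), (pvDigits, "integer"), (['_'], "underscore")]

-- the inner `for v in states[state]: if token in v[0]: …` first-match scan
def pvFindA : List (List Char × String) → Char → Option String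
  | [], _ => none
  | (cs, st) :: rest, c => if cs.contains c then some st else pvFindA rest c

-- the `while True` loop over the remaining characters, carrying `state`
def pvLoopA : List Char → String → String
  | [], state =>
      if state ≠ "letter" ∧ state ≠ "integer" ∧ state ≠ "underscore" then "error" else state
  | c :: rest, state =>
      match pvFindA (pvStatesA state) c with
      | some s' => pvLoopA rest s'
      | none => "error"

def id_FSM (id : String) : String := pvLoopA id.toList "start"

-- ===== PORT B =====
def pvValid (c : Char) : Bool := pvLetters.contains c || pvDigits.contains c || c == '_'

def pvClassify (c : Char) : String :=
  if pvLetters.contains c then "letter"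
  else if pvDigits.contains c then "integer"
  else "underscore"

def id_FSM_alt (id : String) : String :=
  match id.toList with
  | [] => "error"
  | c :: cs =>
    if ¬ pvLetters.contains c then "error"
    else if ¬ (c :: cs).all pvValid then "error"
    else pvClassify (cs.getLastD c)   -- id[-1]

-- ===== PRECONDITION & SPEC =====
def Spec_id_FSM (id : String) (out : String) : Prop := out = id_FSM_alt id
instance (id : String) (out : String) : Decidable (Spec_id_FSM id out) := by unfold Spec_id_FSM; infer_instance

-- ===== CLAIM (what is proved, stated in full; the proofs are below) =====
def Claim_equal_id_FSM : Prop := ∀ (id : String), Dom_id_FSM id → Spec_id_FSM id (id_FSM id)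

-- ===== LEMMAS AND PROOFS =====

lemma pvFind_nonstart (c : Char) :
    pvFindA [(pvLetters, "letter"), (pvDigits, "integer"), (['_'], "underscore")] c
      = if pvValid c then some (pvClassify c) else none := by
  by_cases hl : c ∈ pvLetters <;> by_cases hd : c ∈ pvDigits <;> by_cases hu : c = '_' <;>
    simp [pvFindA, pvValid, pvClassify, hl, hd, hu] <;> subst hu <;> decide

lemma pvClassify_mem (c : Char) :
    pvClassify c = "letter" ∨ pvClassify c = "integer" ∨ pvClassify c = "underscore" := by
  unfold pvClassify; split_ifs <;> simp

lemma pvLoop_nonstart (cs : List Char) :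
    ∀ s, (s = "letter" ∨ s = "integer" ∨ s = "underscore") →
      pvLoopA cs s = if cs.all pvValid then (cs.map pvClassify).getLastD s else "error" := by
  induction cs with
  | nil =>
      intro s hs
      rcases hs with h | h | h <;> subst h <;> simp [pvLoopA]
  | cons c rest ih =>
      intro s hs
      have hst : pvStatesA s = [(pvLetters, "letter"), (pvDigits, "integer"), (['_'], "underscore")] := by
        rcases hs with h | h | h <;> subst h <;> rfl
      simp only [pvLoopA, hst, pvFind_nonstart]
      by_cases hv : pvValid c
      · rw [if_pos hv]
        show pvLoopA rest (pvClassify c) = _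
        rw [ih (pvClassify c) (pvClassify_mem c)]
        simp only [List.all_cons, hv, Bool.true_and, List.map_cons, List.getLastD_cons]
      · simp [hv]

lemma pvGetLastD_map (f : Char → String) (l : List Char) :
    ∀ c, (l.map f).getLastD (f c) = f (l.getLastD c) := by
  induction l with
  | nil => intro c; rfl
  | cons d ds ih => intro c; simp only [List.map_cons, List.getLastD_cons, ih]

theorem id_FSM_spec : Claim_equal_id_FSM := by
  intro id _
  unfold Spec_id_FSM
  cases h : id.toList with
  | nil => simp [id_FSM, id_FSM_alt, h, pvLoopA]
  | cons c cs =>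
      have hstart : pvStatesA "start" = [(pvLetters, "letter")] := rfl
      have haid : id_FSM id = pvLoopA (c :: cs) "start" := by unfold id_FSM; rw [h]
      have halt : id_FSM_alt id =
          (if ¬ pvLetters.contains c then "error"
           else if ¬ (c :: cs).all pvValid then "error"
           else pvClassify (cs.getLastD c)) := by
        unfold id_FSM_alt; rw [h]
      rw [haid, halt]
      by_cases hl : c ∈ pvLetters
      · have hc : pvClassify c = "letter" := by simp [pvClassify, hl]
        have hv : pvValid c = true := by simp [pvValid, hl]
        rw [show pvLoopA (c :: cs) "start" =
              pvLoopA cs "letter" by simp [pvLoopA, hstart, pvFindA, hl]]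
        rw [pvLoop_nonstart cs "letter" (Or.inl rfl)]
        by_cases ha : cs.all pvValid
        · rw [if_pos ha, if_neg (by simp [hl]), if_neg (by simp [hv, ha]), ← hc,
            pvGetLastD_map]
        · rw [if_neg (by simp [ha]), if_neg (by simp [hl]), if_pos (by simp [hv, ha])]
      · have : pvLoopA (c :: cs) "start" = "error" := by
          simp [pvLoopA, hstart, pvFindA, hl]
        simp [this, hl]

-- ===== VERDICT (by name: the statement is the Claim_ definition above) =====
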